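-- pv_equiv track=rewrite | github.com/Girishjks/Gene-Modification-Analyser | genesucessperV2.py | generate_advantages_disadvantages
-- ===== SOURCE A (Python) =====
-- genes = {
--     "Gene_A": 0.8,
--     "Gene_B": 0.65,
--     "Gene_C": 0.9,
--     "Gene_D": 0.7,
--     "Gene_E": 0.6,
-- }
--
-- def generate_advantages_disadvantages(individual):
--     selected_genes = [gene for gene, selected in zip(genes.keys(), individual) if selected]
--
--     advantages = []
--     disadvantages = []
--     key_points = []
--
--     if "Gene_A" in selected_genes:
--         advantages.append("High pollutant absorption capacity")
--         disadvantages.append("May require additional engineering in unstable climates")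
--         key_points.append("Gene_A performs best under moderate temperature.")
--
--     if "Gene_B" in selected_genes:
--         advantages.append("Resistant to moderate humidity changes")
--         disadvantages.append("Limited absorption under high wind speeds")
--         key_points.append("Ensure controlled environments with lower wind speeds for optimal performance.")
--
--     if "Gene_C" in selected_genes:
--         advantages.append("Highly effective at pollutant absorption, even under high temperature")
--         disadvantages.append("Sensitive to sharp humidity changes")
--         key_points.append("Use Gene_C in relatively stable humid conditions.")
--
--     if "Gene_D" in selected_genes:
--         advantages.append("Good for urban areas with variable weather conditions")
--         disadvantages.append("Lower efficiency in low-pressure environments")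
--         key_points.append("Monitor air pressure when deploying Gene_D in city environments.")
--
--     if "Gene_E" in selected_genes:
--         advantages.append("Efficient under low humidity")
--         disadvantages.append("Loses effectiveness in high humidity environments")
--         key_points.append("Deploy Gene_E in drier climates for best results.")
--
--     return advantages, disadvantages, key_points
-- ===== SOURCE B (Python) =====
-- genes = {
--     "Gene_A": 0.8,
--     "Gene_B": 0.65,
--     "Gene_C": 0.9,
--     "Gene_D": 0.7,
--     "Gene_E": 0.6,
-- }
--
-- GENE_INFO = {
--     "Gene_A": ("High pollutant absorption capacity",
--                "May require additional engineering in unstable climates",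
--                "Gene_A performs best under moderate temperature."),
--     "Gene_B": ("Resistant to moderate humidity changes",
--                "Limited absorption under high wind speeds",
--                "Ensure controlled environments with lower wind speeds for optimal performance."),
--     "Gene_C": ("Highly effective at pollutant absorption, even under high temperature",
--                "Sensitive to sharp humidity changes",
--                "Use Gene_C in relatively stable humid conditions."),
--     "Gene_D": ("Good for urban areas with variable weather conditions",
--                "Lower efficiency in low-pressure environments",
--                "Monitor air pressure when deploying Gene_D in city environments."),
--     "Gene_E": ("Efficient under low humidity",
--                "Loses effectiveness in high humidity environments",
--                "Deploy Gene_E in drier climates for best results."),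
-- }
--
-- def generate_advantages_disadvantages(individual):
--     advantages, disadvantages, key_points = [], [], []
--     for gene, selected in zip(genes.keys(), individual):
--         if selected:
--             adv, dis, kp = GENE_INFO[gene]
--             advantages.append(adv)
--             disadvantages.append(dis)
--             key_points.append(kp)
--     return advantages, disadvantages, key_points
-- ===== Notes on version B (the rewrite author's own statement) =====
-- stated objective: simpler
-- what changed: Replaces the intermediate selected_genes list and the chain of five hard-coded membership tests with a gene->(advantage,disadvantage,key_point) table and a single pass over zip(genes, individual) that appends the looked-up triple.
import Mathlib
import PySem

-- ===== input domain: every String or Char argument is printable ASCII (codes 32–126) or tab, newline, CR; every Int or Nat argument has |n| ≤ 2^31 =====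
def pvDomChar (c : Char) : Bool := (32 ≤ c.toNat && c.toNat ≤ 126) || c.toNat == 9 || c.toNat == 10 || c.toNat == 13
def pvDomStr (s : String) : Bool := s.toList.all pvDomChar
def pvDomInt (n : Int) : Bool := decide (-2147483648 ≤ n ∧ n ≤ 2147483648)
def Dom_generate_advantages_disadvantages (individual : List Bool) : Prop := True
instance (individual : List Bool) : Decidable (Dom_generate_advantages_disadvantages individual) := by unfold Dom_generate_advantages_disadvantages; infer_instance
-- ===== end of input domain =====

-- B replaces A's intermediate selected_genes list and five hard-coded membership tests by a
-- gene -> (advantage, disadvantage, key_point) table and one pass over zip(genes, individual) (objective: simpler).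

-- ===== PORT A =====
-- genes.keys() in dict insertion order
def pvGeneKeys : List String := ["Gene_A", "Gene_B", "Gene_C", "Gene_D", "Gene_E"]

def generate_advantages_disadvantages (individual : List Bool) : List String × List String × List String :=
  let selected_genes := ((pvGeneKeys.zip individual).filter (fun p => p.2)).map (fun p => p.1)
  let advantages : List String := []
  let disadvantages : List String := []
  let key_points : List String := []
  let (advantages, disadvantages, key_points) :=
    if selected_genes.contains "Gene_A" then
      (advantages ++ ["High pollutant absorption capacity"],
       disadvantages ++ ["May require additional engineering in unstable climates"],
       key_points ++ ["Gene_A performs best under moderate temperature."])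
    else (advantages, disadvantages, key_points)
  let (advantages, disadvantages, key_points) :=
    if selected_genes.contains "Gene_B" then
      (advantages ++ ["Resistant to moderate humidity changes"],
       disadvantages ++ ["Limited absorption under high wind speeds"],
       key_points ++ ["Ensure controlled environments with lower wind speeds for optimal performance."])
    else (advantages, disadvantages, key_points)
  let (advantages, disadvantages, key_points) :=
    if selected_genes.contains "Gene_C" then
      (advantages ++ ["Highly effective at pollutant absorption, even under high temperature"],
       disadvantages ++ ["Sensitive to sharp humidity changes"],
       key_points ++ ["Use Gene_C in relatively stable humid conditions."])
    else (advantages, disadvantages, key_points)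
  let (advantages, disadvantages, key_points) :=
    if selected_genes.contains "Gene_D" then
      (advantages ++ ["Good for urban areas with variable weather conditions"],
       disadvantages ++ ["Lower efficiency in low-pressure environments"],
       key_points ++ ["Monitor air pressure when deploying Gene_D in city environments."])
    else (advantages, disadvantages, key_points)
  let (advantages, disadvantages, key_points) :=
    if selected_genes.contains "Gene_E" then
      (advantages ++ ["Efficient under low humidity"],
       disadvantages ++ ["Loses effectiveness in high humidity environments"],
       key_points ++ ["Deploy Gene_E in drier climates for best results."])
    else (advantages, disadvantages, key_points)
  (advantages, disadvantages, key_points)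

-- ===== PORT B =====
-- GENE_INFO as an insertion-order association list (PySem.Dict)
def pvGeneInfo : PySem.Dict String (String × String × String) :=
  PySem.Dict.ofList [("Gene_A", ("High pollutant absorption capacity",
               "May require additional engineering in unstable climates",
               "Gene_A performs best under moderate temperature.")),
   ("Gene_B", ("Resistant to moderate humidity changes",
               "Limited absorption under high wind speeds",
               "Ensure controlled environments with lower wind speeds for optimal performance.")),
   ("Gene_C", ("Highly effective at pollutant absorption, even under high temperature",
               "Sensitive to sharp humidity changes",
               "Use Gene_C in relatively stable humid conditions.")),
   ("Gene_D", ("Good for urban areas with variable weather conditions",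
               "Lower efficiency in low-pressure environments",
               "Monitor air pressure when deploying Gene_D in city environments.")),
   ("Gene_E", ("Efficient under low humidity",
               "Loses effectiveness in high humidity environments",
               "Deploy Gene_E in drier climates for best results."))]

def generate_advantages_disadvantages_alt (individual : List Bool) : List String × List String × List String :=
  (pvGeneKeys.zip individual).foldl
    (fun acc p =>
      if p.2 then
        -- GENE_INFO[gene]; every key of pvGeneKeys is in pvGeneInfo, so the none branch is unreachable
        match PySem.Dict.get? pvGeneInfo p.1 with
        | some (adv, dis, kp) => (acc.1 ++ [adv], acc.2.1 ++ [dis], acc.2.2 ++ [kp])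
        | none => acc
      else acc)
    ([], [], [])

-- ===== PRECONDITION & SPEC =====
def Spec_generate_advantages_disadvantages (individual : List Bool) (out : List String × List String × List String) : Prop := out = generate_advantages_disadvantages_alt individual
instance (individual : List Bool) (out : List String × List String × List String) : Decidable (Spec_generate_advantages_disadvantages individual out) := by unfold Spec_generate_advantages_disadvantages; infer_instance

-- ===== CLAIM (what is proved, stated in full; the proofs are below) =====
def Claim_equal_generate_advantages_disadvantages : Prop := ∀ (individual : List Bool), Dom_generate_advantages_disadvantages individual → Spec_generate_advantages_disadvantages individual (generate_advantages_disadvantages individual)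

-- ===== LEMMAS AND PROOFS =====

-- ===== VERDICT (by name: the statement is the Claim_ definition above) =====
theorem generate_advantages_disadvantages_spec : Claim_equal_generate_advantages_disadvantages := by
  intro individual _
  unfold Spec_generate_advantages_disadvantages
  match individual with
  | [] => decide
  | [a] => cases a <;> decide
  | [a, b] => cases a <;> cases b <;> decide
  | [a, b, c] => cases a <;> cases b <;> cases c <;> decide
  | [a, b, c, d] => cases a <;> cases b <;> cases c <;> cases d <;> decide
  | a :: b :: c :: d :: e :: rest =>
    -- zip truncates at the 5 gene keys, so the tail `rest` is definitionally irrelevant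
    have hA : generate_advantages_disadvantages (a :: b :: c :: d :: e :: rest)
        = generate_advantages_disadvantages [a, b, c, d, e] := rfl
    have hB : generate_advantages_disadvantages_alt (a :: b :: c :: d :: e :: rest)
        = generate_advantages_disadvantages_alt [a, b, c, d, e] := rfl
    rw [hA, hB]
    cases a <;> cases b <;> cases c <;> cases d <;> cases e <;> decide
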